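-- pv_equiv track=rewrite | github.com/pypi-data/pypi-mirror-27 | packages/junc/junc-0.1.3.tar.gz/junc-0.1.3/server.py | new_server
-- ===== SOURCE A (Python) =====
-- def new_server(args):
--     attr_list = ['<ip>', '<username>', '<name>', '<location>']
--     new_server = {}
--     for attr in attr_list:
--         if attr in args.keys():
--             pretty_attr = attr.replace('<', '').replace('>', '')
--             new_server[pretty_attr] = args[attr]
--     return new_server
-- ===== SOURCE B (Python) =====
-- _ABSENT = object()
--
-- def new_server(args):
--     # single pass over the input dict with a 4-slot accumulator, then assemble
--     ip = username = name = location = _ABSENT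
--     for key, value in args.items():
--         if key == '<ip>' and ip is _ABSENT:
--             ip = value
--         elif key == '<username>' and username is _ABSENT:
--             username = value
--         elif key == '<name>' and name is _ABSENT:
--             name = value
--         elif key == '<location>' and location is _ABSENT:
--             location = value
--     result = {}
--     if ip is not _ABSENT:
--         result['ip'] = ip
--     if username is not _ABSENT:
--         result['username'] = username
--     if name is not _ABSENT:
--         result['name'] = name
--     if location is not _ABSENT:
--         result['location'] = location
--     return result
-- ===== Notes on version B (the rewrite author's own statement) =====
-- stated objective: alternative
-- what changed: B makes a single pass over the input dict items filling a four-slot accumulator and then assembles the output, instead of iterating the fixed attribute list and probing the dict with membership tests, repeated lookups and string .replace calls.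
import Mathlib
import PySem

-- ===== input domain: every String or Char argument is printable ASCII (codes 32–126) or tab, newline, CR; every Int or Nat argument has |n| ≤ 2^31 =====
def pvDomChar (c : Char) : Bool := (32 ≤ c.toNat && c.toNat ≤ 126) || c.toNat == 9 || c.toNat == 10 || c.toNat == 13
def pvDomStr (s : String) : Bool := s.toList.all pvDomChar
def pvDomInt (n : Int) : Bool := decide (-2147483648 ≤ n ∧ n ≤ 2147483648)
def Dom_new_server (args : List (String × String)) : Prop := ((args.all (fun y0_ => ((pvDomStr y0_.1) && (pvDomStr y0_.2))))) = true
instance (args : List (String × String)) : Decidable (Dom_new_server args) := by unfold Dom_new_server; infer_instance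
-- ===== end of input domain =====

-- B changes the decomposition: one pass over the input items with a four-slot accumulator, then assembly; same cost.

-- ===== PORT A =====
def new_server (args : List (String × String)) : List (String × String) :=
  let argsD : PySem.Dict String String := PySem.Dict.mk args
  let attr_list : List String := ["<ip>", "<username>", "<name>", "<location>"]
  let d := attr_list.foldl (fun (d : PySem.Dict String String) attr =>
    if argsD.contains attr then
      let pretty_attr := PySem.Str.replace (PySem.Str.replace attr "<" "") ">" ""
      match argsD.get? attr with
      | some v => d.insert pretty_attr v
      | none => d
    else d) PySem.Dict.empty
  d.items

-- ===== PORT B =====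
def new_server_alt (args : List (String × String)) : List (String × String) :=
  let st := args.foldl (fun (s : Option String × Option String × Option String × Option String) kv =>
    if kv.1 == "<ip>" && s.1.isNone then (some kv.2, s.2.1, s.2.2.1, s.2.2.2)
    else if kv.1 == "<username>" && s.2.1.isNone then (s.1, some kv.2, s.2.2.1, s.2.2.2)
    else if kv.1 == "<name>" && s.2.2.1.isNone then (s.1, s.2.1, some kv.2, s.2.2.2)
    else if kv.1 == "<location>" && s.2.2.2.isNone then (s.1, s.2.1, s.2.2.1, some kv.2)
    else s) (none, none, none, none)
  (match st.1 with | some v => [("ip", v)] | none => []) ++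
  (match st.2.1 with | some v => [("username", v)] | none => []) ++
  (match st.2.2.1 with | some v => [("name", v)] | none => []) ++
  (match st.2.2.2 with | some v => [("location", v)] | none => [])

-- ===== PRECONDITION & SPEC =====
def Spec_new_server (args : List (String × String)) (out : List (String × String)) : Prop := out = new_server_alt args
instance (args : List (String × String)) (out : List (String × String)) : Decidable (Spec_new_server args out) := by unfold Spec_new_server; infer_instance

-- ===== CLAIM (what is proved, stated in full; the proofs are below) =====
def Claim_equal_new_server : Prop := ∀ (args : List (String × String)), Dom_new_server args → Spec_new_server args (new_server args)

-- ===== LEMMAS AND PROOFS =====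

-- B's fold fills each still-empty slot with the first match, i.e. the dict lookup.
theorem foldB_eq (args : List (String × String)) :
    ∀ s : Option String × Option String × Option String × Option String,
      args.foldl (fun (s : Option String × Option String × Option String × Option String) kv =>
        if kv.1 == "<ip>" && s.1.isNone then (some kv.2, s.2.1, s.2.2.1, s.2.2.2)
        else if kv.1 == "<username>" && s.2.1.isNone then (s.1, some kv.2, s.2.2.1, s.2.2.2)
        else if kv.1 == "<name>" && s.2.2.1.isNone then (s.1, s.2.1, some kv.2, s.2.2.2)
        else if kv.1 == "<location>" && s.2.2.2.isNone then (s.1, s.2.1, s.2.2.1, some kv.2)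
        else s) s =
      (s.1.or ((PySem.Dict.mk args).get? "<ip>"),
       s.2.1.or ((PySem.Dict.mk args).get? "<username>"),
       s.2.2.1.or ((PySem.Dict.mk args).get? "<name>"),
       s.2.2.2.or ((PySem.Dict.mk args).get? "<location>")) := by
  induction args with
  | nil => intro s; simp [PySem.Dict.get?]
  | cons kv rest ih =>
    intro s
    obtain ⟨k, v⟩ := kv
    rw [List.foldl_cons, ih]
    obtain ⟨ip, un, nm, lo⟩ := s
    by_cases h1 : k = "<ip>"
    · subst h1; cases ip <;> simp [PySem.Dict.get?_mk_cons]
    · by_cases h2 : k = "<username>"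
      · subst h2; cases un <;> simp [PySem.Dict.get?_mk_cons]
      · by_cases h3 : k = "<name>"
        · subst h3; cases nm <;> simp [PySem.Dict.get?_mk_cons]
        · by_cases h4 : k = "<location>"
          · subst h4; cases lo <;> simp [PySem.Dict.get?_mk_cons]
          · simp [PySem.Dict.get?_mk_cons, h1, h2, h3, h4]

-- ===== VERDICT (by name: the statement is the Claim_ definition above) =====
theorem new_server_spec : Claim_equal_new_server := by
  intro args _
  show new_server args = new_server_alt args
  unfold new_server new_server_alt
  rw [foldB_eq]
  have p1 : PySem.Str.replace (PySem.Str.replace "<ip>" "<" "") ">" "" = "ip" := by decide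
  have p2 : PySem.Str.replace (PySem.Str.replace "<username>" "<" "") ">" "" = "username" := by decide
  have p3 : PySem.Str.replace (PySem.Str.replace "<name>" "<" "") ">" "" = "name" := by decide
  have p4 : PySem.Str.replace (PySem.Str.replace "<location>" "<" "") ">" "" = "location" := by decide
  simp only [List.foldl_cons, List.foldl_nil, PySem.Dict.contains_eq_isSome_get?, p1, p2, p3, p4]
  rcases h1 : (PySem.Dict.mk args).get? "<ip>" with _ | v1 <;>
    rcases h2 : (PySem.Dict.mk args).get? "<username>" with _ | v2 <;>
      rcases h3 : (PySem.Dict.mk args).get? "<name>" with _ | v3 <;>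
        rcases h4 : (PySem.Dict.mk args).get? "<location>" with _ | v4 <;>
          simp [PySem.Dict.insert, PySem.Dict.empty, PySem.Dict.contains]
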